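-- pv_equiv track=rewrite | github.com/popojan/orbit | scripts/quantify_asymmetry.py | nth_prime_before
-- ===== SOURCE A (Python) =====
-- def is_prime(n):
--     if n < 2:
--         return False
--     if n == 2:
--         return True
--     if n % 2 == 0:
--         return False
--     for i in range(3, int(n**0.5) + 1, 2):
--         if n % i == 0:
--             return False
--     return True
--
-- def nth_prime_before(p, n):
--     """Find n-th prime before p"""
--     primes_before = []
--     candidate = p - 1
--     while len(primes_before) < n and candidate >= 2:
--         if is_prime(candidate):
--             primes_before.append(candidate)
--         candidate -= 1
--     return primes_before[n-1] if len(primes_before) >= n else None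
-- ===== SOURCE B (Python) =====
-- def nth_prime_before(p, n):
--     """Find n-th prime before p: precompute base primes up to isqrt(p-1) once,
--     then scan downward testing each candidate by dividing by base primes only."""
--     base = []
--     b = 2
--     while b * b < p:
--         is_p = True
--         j = 2
--         while j * j <= b:
--             if b % j == 0:
--                 is_p = False
--                 break
--             j += 1
--         if is_p:
--             base.append(b)
--         b += 1
--     count = 0
--     m = p - 1
--     while m >= 2:
--         prime = True
--         for q in base:
--             if q * q > m:
--                 break
--             if m % q == 0:
--                 prime = False
--                 break
--         if prime:
--             count += 1
--             if count == n:
--                 return m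
--         m -= 1
--     return None
-- ===== Notes on version B (the rewrite author's own statement) =====
-- stated objective: faster
-- what changed: B precomputes the table of base primes up to isqrt(p-1) once and tests each downward candidate by dividing only by those primes (with an early q*q > m break) while counting hits, instead of A's per-candidate trial division by all odd numbers up to the candidate's float square root accumulated into a list.
import Mathlib
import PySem

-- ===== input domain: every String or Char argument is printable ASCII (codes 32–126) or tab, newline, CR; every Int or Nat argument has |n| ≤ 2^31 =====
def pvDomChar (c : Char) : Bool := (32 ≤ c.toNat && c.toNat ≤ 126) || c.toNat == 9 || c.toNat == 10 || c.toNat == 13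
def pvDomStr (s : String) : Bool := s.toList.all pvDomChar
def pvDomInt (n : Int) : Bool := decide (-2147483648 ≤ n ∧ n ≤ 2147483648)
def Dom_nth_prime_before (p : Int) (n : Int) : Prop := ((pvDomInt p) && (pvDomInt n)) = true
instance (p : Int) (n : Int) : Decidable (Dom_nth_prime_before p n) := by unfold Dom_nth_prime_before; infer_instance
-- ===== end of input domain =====

-- B replaces A's per-candidate odd-step trial division by a one-off table of base primes
-- up to isqrt(p-1), against which each downward candidate is divided (primes only, with an
-- early q*q > m break), counting hits instead of accumulating a list.
-- (The Nat fuel arguments below only make the while-loops structurally total; each call site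
-- supplies more fuel than the loop can consume, so they change nothing.)

-- ===== PORT A =====
-- is_prime: `int(n**0.5)` is the integer square root for 0 ≤ n ≤ 2^31 (double rounding
-- cannot cross an integer there), ported exactly as Nat.sqrt on that domain.
def isPrimeA (n : Int) : Bool :=
  if n < 2 then false
  else if n = 2 then true
  else if PySem.Int.mod n 2 = 0 then false
  else (PySem.List.pyRange 3 ((Nat.sqrt n.toNat : Int) + 1) 2).all
        (fun i => !(PySem.Int.mod n i = 0))

-- the `while` loop: state (primes_before, candidate)
def loopA (n : Int) : Nat → List Int → Int → List Int
  | 0, primes, _ => primes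
  | fuel + 1, primes, c =>
    if (primes.length : Int) < n ∧ 2 ≤ c then
      loopA n fuel (if isPrimeA c then primes ++ [c] else primes) (c - 1)
    else primes

def nth_prime_before (p : Int) (n : Int) : Option Int :=
  let primes := loopA n (p - 1).toNat [] (p - 1)
  -- Python returns primes_before[n-1] when len ≥ n (the IndexError for n ≤ 0 is excluded by Pre_)
  if n ≤ (primes.length : Int) then PySem.List.pyGet? primes (n - 1) else none

-- ===== PORT B =====
-- inner `while j * j <= b` trial-division loop of the base-prime precomputation
def loopJ (b : Int) : Nat → Int → Bool
  | 0, _ => true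
  | fuel + 1, j =>
    if j * j ≤ b then
      if PySem.Int.mod b j = 0 then false else loopJ b fuel (j + 1)
    else true

-- `while b * b < p` loop building the base-prime table
def loopBase (p : Int) : Nat → List Int → Int → List Int
  | 0, base, _ => base
  | fuel + 1, base, b =>
    if b * b < p then
      loopBase p fuel (if loopJ b (b.toNat + 1) 2 then base ++ [b] else base) (b + 1)
    else base

-- `for q in base: …` with the two breaks
def testM (m : Int) : List Int → Bool
  | [] => true
  | q :: rest =>
    if m < q * q then true
    else if PySem.Int.mod m q = 0 then false
    else testM m rest

-- `while m >= 2` downward scan counting primes found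
def loopScan (n : Int) (base : List Int) : Nat → Int → Int → Option Int
  | 0, _, _ => none
  | fuel + 1, count, m =>
    if 2 ≤ m then
      if testM m base then
        if count + 1 = n then some m
        else loopScan n base fuel (count + 1) (m - 1)
      else loopScan n base fuel count (m - 1)
    else none

def nth_prime_before_alt (p : Int) (n : Int) : Option Int :=
  loopScan n (loopBase p p.toNat [] 2) (p - 1).toNat 0 (p - 1)

-- ===== PRECONDITION & SPEC =====
-- Pre_ excludes n ≤ 0, on which A raises IndexError (primes_before[n-1] on an empty list).
def Pre_nth_prime_before (p : Int) (n : Int) : Prop := 1 ≤ n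
instance (p : Int) (n : Int) : Decidable (Pre_nth_prime_before p n) := by
  unfold Pre_nth_prime_before; infer_instance

def pvWitness_nth_prime_before : Int × Int := (20, 3)

def Spec_nth_prime_before (p : Int) (n : Int) (out : Option Int) : Prop := out = nth_prime_before_alt p n
instance (p : Int) (n : Int) (out : Option Int) : Decidable (Spec_nth_prime_before p n out) := by unfold Spec_nth_prime_before; infer_instance

-- ===== CLAIM (what is proved, stated in full; the proofs are below) =====
def Claim_equal_nth_prime_before : Prop := ∀ (p : Int) (n : Int), Dom_nth_prime_before p n → Pre_nth_prime_before p n → Spec_nth_prime_before p n (nth_prime_before p n)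

-- ===== LEMMAS AND PROOFS =====

-- `Good m`: m has no divisor d with 2 ≤ d and d*d ≤ m (for 2 ≤ m this is primality)
def Good (m : Int) : Prop := ∀ d : Int, 2 ≤ d → d * d ≤ m → ¬ d ∣ m

theorem loopJ_spec (b : Int) : ∀ (f : Nat) (j : Int), 2 ≤ j → (b + 1 - j).toNat ≤ f →
    (loopJ b f j = true ↔ ∀ i : Int, j ≤ i → i * i ≤ b → ¬ i ∣ b) := by
  intro f
  induction f with
  | zero =>
    intro j hj hf
    refine iff_of_true rfl ?_
    intro i hi hii _
    have hjb : b + 1 ≤ j := by omega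
    have h1 : 2 * i ≤ i * i := by nlinarith
    have h0 : (0:Int) ≤ i * i := mul_self_nonneg i
    linarith
  | succ f ih =>
    intro j hj hf
    rw [loopJ]
    by_cases h : j * j ≤ b
    · rw [if_pos h]
      by_cases hdvd : PySem.Int.mod b j = 0
      · rw [if_pos hdvd]
        refine iff_of_false (by simp) ?_
        intro H
        exact H j (le_refl j) h ((PySem.Int.mod_eq_zero_iff_dvd b j).mp hdvd)
      · rw [if_neg hdvd]
        rw [ih (j + 1) (by omega) (by omega)]
        constructor
        · intro H i hi hii hdv
          rcases eq_or_lt_of_le hi with rfl | hlt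
          · exact hdvd ((PySem.Int.mod_eq_zero_iff_dvd b j).mpr hdv)
          · exact H i (by omega) hii hdv
        · intro H i hi hii
          exact H i (by omega) hii
    · rw [if_neg h]
      refine iff_of_true rfl ?_
      intro i hi hii _
      nlinarith

theorem mem_loopBase (p x : Int) : ∀ (f : Nat) (acc : List Int) (b : Int), 2 ≤ b → (p - b).toNat ≤ f →
    (x ∈ loopBase p f acc b ↔ x ∈ acc ∨ (b ≤ x ∧ x * x < p ∧ loopJ x (x.toNat + 1) 2 = true)) := by
  intro f
  induction f with
  | zero =>
    intro acc b hb hf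
    rw [loopBase]
    constructor
    · exact Or.inl
    · rintro (hx | ⟨h1, h2, h3⟩)
      · exact hx
      · exfalso
        have hpb : p ≤ b := by omega
        have hx1 : x ≤ x * x := by nlinarith
        linarith
  | succ f ih =>
    intro acc b hb hf
    rw [loopBase]
    by_cases h : b * b < p
    · rw [if_pos h]
      have hbp : b < p := by nlinarith
      rw [ih _ (b + 1) (by omega) (by omega)]
      by_cases hJ : loopJ b (b.toNat + 1) 2 = true
      · rw [if_pos hJ]
        simp only [List.mem_append, List.mem_singleton]
        constructor
        · rintro ((hx | rfl) | ⟨h1, h2, h3⟩)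
          · exact Or.inl hx
          · exact Or.inr ⟨le_refl x, h, hJ⟩
          · exact Or.inr ⟨by omega, h2, h3⟩
        · rintro (hx | ⟨h1, h2, h3⟩)
          · exact Or.inl (Or.inl hx)
          · rcases eq_or_lt_of_le h1 with rfl | hlt
            · exact Or.inl (Or.inr rfl)
            · exact Or.inr ⟨by omega, h2, h3⟩
      · rw [if_neg hJ]
        constructor
        · rintro (hx | ⟨h1, h2, h3⟩)
          · exact Or.inl hx
          · exact Or.inr ⟨by omega, h2, h3⟩
        · rintro (hx | ⟨h1, h2, h3⟩)
          · exact Or.inl hx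
          · rcases eq_or_lt_of_le h1 with rfl | hlt
            · exact absurd h3 hJ
            · exact Or.inr ⟨by omega, h2, h3⟩
    · rw [if_neg h]
      constructor
      · exact Or.inl
      · rintro (hx | ⟨h1, h2, h3⟩)
        · exact hx
        · exfalso; nlinarith

theorem sorted_loopBase (p : Int) : ∀ (f : Nat) (acc : List Int) (b : Int),
    (∀ x ∈ acc, x < b) → acc.Pairwise (· < ·) →
    (loopBase p f acc b).Pairwise (· < ·) := by
  intro f
  induction f with
  | zero => intro acc b _ hpw; rw [loopBase]; exact hpw
  | succ f ih =>
    intro acc b hlt hpw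
    rw [loopBase]
    by_cases h : b * b < p
    · rw [if_pos h]
      apply ih
      · intro x hx
        by_cases hJ : loopJ b (b.toNat + 1) 2 = true
        · rw [if_pos hJ] at hx
          rcases List.mem_append.mp hx with hx | hx
          · have := hlt x hx; omega
          · simp at hx; omega
        · rw [if_neg hJ] at hx; have := hlt x hx; omega
      · by_cases hJ : loopJ b (b.toNat + 1) 2 = true
        · rw [if_pos hJ, List.pairwise_append]
          refine ⟨hpw, List.pairwise_singleton _ _, ?_⟩
          intro a ha b' hb'
          simp at hb'; subst hb'; exact hlt a ha
        · rw [if_neg hJ]; exact hpw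
    · rw [if_neg h]; exact hpw

theorem testM_spec (m : Int) : ∀ l : List Int, l.Pairwise (· < ·) → (∀ x ∈ l, 2 ≤ x) →
    (testM m l = true ↔ ∀ q ∈ l, q * q ≤ m → ¬ q ∣ m) := by
  intro l
  induction l with
  | nil => intro _ _; simp [testM]
  | cons q rest ih =>
    intro hpw hx
    rw [testM]
    by_cases h1 : m < q * q
    · rw [if_pos h1]
      refine iff_of_true rfl ?_
      intro q' hq' hle
      rcases List.mem_cons.mp hq' with rfl | hmem
      · omega
      · have hqq : q < q' := (List.pairwise_cons.mp hpw).1 q' hmem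
        have h2q : 2 ≤ q := hx q (by simp)
        intro _
        have : q * q < q' * q' := by nlinarith
        omega
    · rw [if_neg h1]
      by_cases h2 : PySem.Int.mod m q = 0
      · rw [if_pos h2]
        refine iff_of_false (by simp) ?_
        intro H
        exact H q (by simp) (by omega) ((PySem.Int.mod_eq_zero_iff_dvd m q).mp h2)
      · rw [if_neg h2]
        rw [ih (List.Pairwise.of_cons hpw) (fun x hx' => hx x (by simp [hx']))]
        constructor
        · intro H q' hq' hle
          rcases List.mem_cons.mp hq' with rfl | hmem
          · exact fun hd => h2 ((PySem.Int.mod_eq_zero_iff_dvd m q').mpr hd)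
          · exact H q' hmem hle
        · intro H q' hq' hle
          exact H q' (by simp [hq']) hle

theorem testM_base (p m : Int) (hm : 2 ≤ m) (hmp : m < p) :
    (testM m (loopBase p p.toNat [] 2) = true ↔ Good m) := by
  have hmem : ∀ x : Int, x ∈ loopBase p p.toNat [] 2 ↔
      (2 ≤ x ∧ x * x < p ∧ loopJ x (x.toNat + 1) 2 = true) := by
    intro x
    rw [mem_loopBase p x p.toNat [] 2 (by omega) (by omega)]
    simp
  have hsorted := sorted_loopBase p p.toNat [] 2 (by simp) (by simp)
  rw [testM_spec m _ hsorted (fun x hx => ((hmem x).mp hx).1)]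
  constructor
  · intro H
    by_contra hng
    unfold Good at hng; push Not at hng
    obtain ⟨d, hd2, hdd, hddvd⟩ := hng
    have hmM : ((m.toNat : Int)) = m := Int.toNat_of_nonneg (by omega)
    have hdm : d < m := by nlinarith
    have hdvdN : d.toNat ∣ m.toNat := by
      have h' : (d.toNat : Int) ∣ (m.toNat : Int) := by
        rwa [Int.toNat_of_nonneg (show (0:Int) ≤ d by omega), hmM]
      exact_mod_cast h'
    have hnotp : ¬ Nat.Prime m.toNat := by
      intro hP
      rcases hP.eq_one_or_self_of_dvd _ hdvdN with h1 | h1 <;> omega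
    have hq := Nat.minFac_prime (show m.toNat ≠ 1 by omega)
    have hqd : m.toNat.minFac ∣ m.toNat := Nat.minFac_dvd m.toNat
    have hsq : m.toNat.minFac ^ 2 ≤ m.toNat := Nat.minFac_sq_le_self (by omega) hnotp
    have hq2 : 2 ≤ (m.toNat.minFac : Int) := by exact_mod_cast hq.two_le
    have hqq : (m.toNat.minFac : Int) * (m.toNat.minFac : Int) ≤ m := by
      rw [pow_two] at hsq
      calc (m.toNat.minFac : Int) * (m.toNat.minFac : Int)
          = ((m.toNat.minFac * m.toNat.minFac : Nat) : Int) := by push_cast; ring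
        _ ≤ ((m.toNat : Nat) : Int) := by exact_mod_cast hsq
        _ = m := hmM
    have hqdvd : (m.toNat.minFac : Int) ∣ m := by
      rw [← hmM]; exact_mod_cast hqd
    have hqbase : (m.toNat.minFac : Int) ∈ loopBase p p.toNat [] 2 := by
      rw [hmem]
      refine ⟨hq2, by omega, ?_⟩
      rw [loopJ_spec _ _ 2 (by omega) (by omega)]
      intro i hi hii hidvd
      have hiN : (i.toNat : Int) = i := Int.toNat_of_nonneg (by omega)
      have hidN : i.toNat ∣ m.toNat.minFac := by
        have h' : (i.toNat : Int) ∣ (m.toNat.minFac : Int) := by rwa [hiN]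
        exact_mod_cast h'
      rcases hq.eq_one_or_self_of_dvd _ hidN with h1 | h1
      · omega
      · have hieq : i = (m.toNat.minFac : Int) := by omega
        rw [hieq] at hii
        nlinarith
    exact H _ hqbase hqq hqdvd
  · intro hg q hq hle
    exact hg q ((hmem q).mp hq).1 hle

theorem isPrimeA_spec (m : Int) : isPrimeA m = true ↔ (2 ≤ m ∧ Good m) := by
  unfold isPrimeA
  by_cases h1 : m < 2
  · rw [if_pos h1]
    refine iff_of_false (by simp) (by rintro ⟨h, -⟩; omega)
  rw [if_neg h1]
  by_cases h2 : m = 2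
  · subst h2; rw [if_pos rfl]
    refine iff_of_true rfl ⟨by omega, ?_⟩
    intro d hd hdd _
    nlinarith
  rw [if_neg h2]
  by_cases h3 : PySem.Int.mod m 2 = 0
  · rw [if_pos h3]
    refine iff_of_false (by simp) ?_
    rintro ⟨hm2, hg⟩
    have h2d : (2:Int) ∣ m := (PySem.Int.mod_eq_zero_iff_dvd m 2).mp h3
    have hm4 : 4 ≤ m := by obtain ⟨k, rfl⟩ := h2d; omega
    exact hg 2 (by omega) (by omega) h2d
  · rw [if_neg h3]
    have hm3 : 3 ≤ m := by omega
    have hodd : ¬ (2:Int) ∣ m := fun hd => h3 ((PySem.Int.mod_eq_zero_iff_dvd m 2).mpr hd)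
    rw [List.all_eq_true]
    have hmM : ((m.toNat : Int)) = m := Int.toNat_of_nonneg (by omega)
    have key : ∀ i : Int, 0 ≤ i → (i * i ≤ m ↔ i.toNat ≤ Nat.sqrt m.toNat) := by
      intro i hi
      rw [Nat.le_sqrt]
      constructor
      · intro h
        have h' : ((i.toNat * i.toNat : Nat) : Int) ≤ ((m.toNat : Nat) : Int) := by
          push_cast [Int.toNat_of_nonneg hi, hmM]
          exact h
        exact_mod_cast h'
      · intro h
        have h' : ((i.toNat * i.toNat : Nat) : Int) ≤ ((m.toNat : Nat) : Int) := by exact_mod_cast h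
        rw [hmM] at h'
        push_cast [Int.toNat_of_nonneg hi] at h'
        exact h'
    constructor
    · intro H
      refine ⟨by omega, ?_⟩
      intro d hd hdd hdvd
      have hd2 : ¬ (2:Int) ∣ d := fun h2d => hodd (h2d.trans hdvd)
      have hd3 : 3 ≤ d := by omega
      have hds : d.toNat ≤ Nat.sqrt m.toNat := (key d (by omega)).mp hdd
      have hmem : d ∈ PySem.List.pyRange 3 ((Nat.sqrt m.toNat : Int) + 1) 2 := by
        rw [PySem.List.mem_pyRange_iff_of_pos (by omega)]
        exact ⟨by omega, by omega, by omega⟩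
      have := H d hmem
      simp only [Bool.not_eq_true', decide_eq_false_iff_not] at this
      exact this ((PySem.Int.mod_eq_zero_iff_dvd m d).mpr hdvd)
    · rintro ⟨-, hg⟩ i hi
      rw [PySem.List.mem_pyRange_iff_of_pos (by omega)] at hi
      obtain ⟨hi3, his, hipar⟩ := hi
      have hii : i * i ≤ m := (key i (by omega)).mpr (by omega)
      simp only [Bool.not_eq_true', decide_eq_false_iff_not]
      intro hmod
      exact hg i (by omega) hii ((PySem.Int.mod_eq_zero_iff_dvd m i).mp hmod)

theorem loopA_done (n : Int) : ∀ (fuel : Nat) (acc : List Int) (c : Int),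
    ¬ ((acc.length : Int) < n) → loopA n fuel acc c = acc := by
  intro fuel acc c h
  cases fuel with
  | zero => rw [loopA]
  | succ fuel => rw [loopA, if_neg (by omega)]

theorem loop_equiv_aux (p n : Int) : ∀ (fA : Nat) (fS : Nat) (c : Int),
    (c - 1).toNat ≤ fA → (c - 1).toNat ≤ fS →
    ∀ (acc : List Int) (count : Int),
    c < p → count = (acc.length : Int) → count < n →
    (if n ≤ ((loopA n fA acc c).length : Int)
      then PySem.List.pyGet? (loopA n fA acc c) (n - 1) else none)
      = loopScan n (loopBase p p.toNat [] 2) fS count c := by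
  intro fA
  induction fA with
  | zero =>
    intro fS c hcA hcS acc count hcp hlen hcount
    have h2 : ¬ 2 ≤ c := by omega
    rw [loopA, if_neg (by omega)]
    cases fS with
    | zero => rw [loopScan]
    | succ fS => rw [loopScan, if_neg h2]
  | succ fA ih =>
    intro fS c hcA hcS acc count hcp hlen hcount
    by_cases h2 : 2 ≤ c
    · obtain ⟨fS', rfl⟩ : ∃ fS', fS = fS' + 1 := ⟨fS - 1, by omega⟩
      have hAB : isPrimeA c = testM c (loopBase p p.toNat [] 2) := by
        rw [Bool.eq_iff_iff, isPrimeA_spec c, testM_base p c h2 hcp]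
        constructor
        · rintro ⟨-, hg⟩; exact hg
        · intro hg; exact ⟨h2, hg⟩
      rw [loopA, if_pos (show ((acc.length : Int) < n ∧ 2 ≤ c) from ⟨by omega, h2⟩)]
      rw [loopScan, if_pos h2, ← hAB]
      cases hA : isPrimeA c with
      | false =>
        simp only [Bool.false_eq_true, if_false]
        exact ih fS' (c - 1) (by omega) (by omega) acc count (by omega) hlen hcount
      | true =>
        simp only [if_true]
        by_cases hEq : count + 1 = n
        · rw [if_pos hEq]
          have hlenn : (((acc ++ [c]).length : Nat) : Int) = n := by
            simp only [List.length_append, List.length_cons, List.length_nil]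
            push_cast
            omega
          rw [loopA_done n fA _ _ (by rw [hlenn]; omega)]
          rw [if_pos (le_of_eq hlenn.symm)]
          have hidx : n - 1 = ((acc.length : Nat) : Int) := by
            simp only [List.length_append, List.length_cons, List.length_nil] at hlenn
            push_cast at hlenn
            omega
          rw [hidx, PySem.List.pyGet?_natCast]
          simp
        · rw [if_neg hEq]
          exact ih fS' (c - 1) (by omega) (by omega) (acc ++ [c]) (count + 1) (by omega)
            (by simp only [List.length_append, List.length_cons, List.length_nil]; push_cast; omega)
            (by omega)
    · rw [loopA, if_neg (show ¬ ((acc.length : Int) < n ∧ 2 ≤ c) by omega),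
        if_neg (show ¬ (n ≤ (acc.length : Int)) by omega)]
      cases fS with
      | zero => rw [loopScan]
      | succ fS => rw [loopScan, if_neg h2]

-- ===== VERDICT (by name: the statement is the Claim_ definition above) =====
theorem nth_prime_before_spec : Claim_equal_nth_prime_before := by
  intro p n _ hn
  unfold Spec_nth_prime_before nth_prime_before nth_prime_before_alt
  simpa using loop_equiv_aux p n (p - 1).toNat (p - 1).toNat (p - 1) (by omega) (by omega) [] 0
    (by omega) (by simp) (by exact_mod_cast hn)
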